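-- pv_equiv track=rewrite | github.com/Xiaojun-Wei/LeetCode | interview/Kpsha/1-holes.py | shortest_board_length
-- ===== SOURCE A (Python) =====
-- def shortest_board_length(A):
--     max_hole_pos = max(A)
--     min_hole_pos = min(A)
--     min_board_length = max_hole_pos - min_hole_pos + 1
--     for board_length in range(1, max_hole_pos - min_hole_pos + 1):
--         can_cover_all_holes = True
--         for hole_pos in A:
--             if not (min_hole_pos <= hole_pos <= min_hole_pos + board_length or
--                     max_hole_pos - board_length <= hole_pos <= max_hole_pos):
--                 can_cover_all_holes = False
--                 break
--         if can_cover_all_holes: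
--             min_board_length = min(min_board_length, board_length)
--     return min_board_length
-- ===== SOURCE B (Python) =====
-- def shortest_board_length(A):
--     lo = min(A)
--     hi = max(A)
--     t = max(min(h - lo, hi - h) for h in A)
--     return max(t, 1)
-- ===== Notes on version B (the rewrite author's own statement) =====
-- stated objective: faster
-- what changed: Replaced the trial loop over every candidate board length (each rescanning all holes) by a single pass computing T = max over holes of min(hole-min, max-hole) and returning max(T, 1).
import Mathlib
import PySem

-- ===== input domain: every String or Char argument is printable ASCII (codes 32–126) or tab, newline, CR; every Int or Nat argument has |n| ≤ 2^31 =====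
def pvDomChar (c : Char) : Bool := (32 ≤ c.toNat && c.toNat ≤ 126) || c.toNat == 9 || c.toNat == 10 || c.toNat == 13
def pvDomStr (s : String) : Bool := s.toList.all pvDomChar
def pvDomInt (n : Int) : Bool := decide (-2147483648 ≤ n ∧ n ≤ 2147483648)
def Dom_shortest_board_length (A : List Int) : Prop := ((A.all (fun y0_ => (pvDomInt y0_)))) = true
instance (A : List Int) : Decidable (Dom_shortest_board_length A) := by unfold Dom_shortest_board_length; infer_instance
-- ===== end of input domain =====

-- B replaces A's trial loop over all candidate board lengths by a single pass
-- computing T = max over holes of min(hole-min, max-hole), returning max(T,1);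
-- asymptotically faster. Pre_ excludes the empty list (A raises ValueError there).


-- ===== PORT A =====
def shortest_board_length (A : List Int) : Int :=
  match PySem.List.max? A (fun x => x), PySem.List.min? A (fun x => x) with
  | some max_hole_pos, some min_hole_pos =>
    let init := max_hole_pos - min_hole_pos + 1
    (PySem.List.pyRange 1 (max_hole_pos - min_hole_pos + 1) 1).foldl
      (fun min_board_length board_length =>
        let can_cover_all_holes := A.all (fun hole_pos =>
          decide ((min_hole_pos ≤ hole_pos ∧ hole_pos ≤ min_hole_pos + board_length) ∨
                  (max_hole_pos - board_length ≤ hole_pos ∧ hole_pos ≤ max_hole_pos)))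
        if can_cover_all_holes then min min_board_length board_length else min_board_length)
      init
  | _, _ => 0  -- unreachable under Pre_ (A ≠ []): Python raises ValueError on []

-- ===== PORT B =====
def shortest_board_length_alt (A : List Int) : Int :=
  ((PySem.List.min? A (fun x => x)).bind (fun lo =>
    (PySem.List.max? A (fun x => x)).bind (fun hi =>
      (PySem.List.max? (A.map (fun h => min (h - lo) (hi - h))) (fun x => x)).map (fun t =>
        max t 1)))).getD 0  -- getD's 0 is unreachable under Pre_ (A ≠ [])

-- ===== PRECONDITION & SPEC =====
-- Pre_ excludes exactly the empty list, on which Python's max(A) raises ValueError.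
def Pre_shortest_board_length (A : List Int) : Prop := A ≠ []
instance (A : List Int) : Decidable (Pre_shortest_board_length A) := by unfold Pre_shortest_board_length; infer_instance
def pvWitness_shortest_board_length : List Int := [2, 5, 3]
def Spec_shortest_board_length (A : List Int) (out : Int) : Prop := out = shortest_board_length_alt A
instance (A : List Int) (out : Int) : Decidable (Spec_shortest_board_length A out) := by unfold Spec_shortest_board_length; infer_instance

-- ===== CLAIM (what is proved, stated in full; the proofs are below) =====
def Claim_equal_shortest_board_length : Prop := ∀ (A : List Int), Dom_shortest_board_length A → Pre_shortest_board_length A → Spec_shortest_board_length A (shortest_board_length A)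

-- ===== LEMMAS AND PROOFS =====

theorem pv_foldl_min_if (P : Int → Bool) (l : List Int) (a : Int) :
    l.foldl (fun mb L => if P L then min mb L else mb) a
      = (l.filter P).foldl min a := by
  induction l generalizing a with
  | nil => rfl
  | cons x xs ih =>
    simp only [List.foldl_cons, List.filter_cons]
    by_cases h : P x = true
    · simp [h, ih]
    · simp [h, ih]

theorem pv_foldl_min_ge (l : List Int) (b : Int) (h : ∀ x ∈ l, b ≤ x) :
    l.foldl min b = b := by
  induction l generalizing b with
  | nil => rfl
  | cons x xs ih =>
    have hx : b ≤ x := h x (by simp)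
    simp only [List.foldl_cons, min_eq_left hx]
    exact ih b (fun y hy => h y (by simp [hy]))

theorem pv_foldl_min_mem (l : List Int) (a c : Int) (h1 : c ∈ l) (h2 : ∀ x ∈ l, c ≤ x) :
    l.foldl min a = min a c := by
  induction l generalizing a with
  | nil => exact absurd h1 (by simp)
  | cons x xs ih =>
    simp only [List.foldl_cons]
    rcases List.mem_cons.mp h1 with hc | hc
    · subst hc
      by_cases hmem : c ∈ xs
      · rw [ih (min a c) hmem (fun y hy => h2 y (by simp [hy]))]
        omega
      · rw [pv_foldl_min_ge xs (min a c) ?_]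
        intro y hy
        have := h2 y (by simp [hy])
        omega
    · have hcx : c ≤ x := h2 x (by simp)
      rw [ih (min a x) hc (fun y hy => h2 y (by simp [hy]))]
      omega

-- ===== VERDICT (by name: the statement is the Claim_ definition above) =====

theorem shortest_board_length_spec : Claim_equal_shortest_board_length := by
  intro A _ hpre
  unfold Spec_shortest_board_length shortest_board_length shortest_board_length_alt
  -- the three extrema exist on a nonempty list
  obtain ⟨mx, hmx⟩ : ∃ mx, PySem.List.max? A (fun x => x) = some mx := by
    cases h : PySem.List.max? A (fun x => x) with
    | none => exact absurd ((PySem.List.max?_eq_none_iff _ _).mp h) hpre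
    | some m => exact ⟨m, rfl⟩
  obtain ⟨mn, hmn⟩ : ∃ mn, PySem.List.min? A (fun x => x) = some mn := by
    cases h : PySem.List.min? A (fun x => x) with
    | none => exact absurd ((PySem.List.min?_eq_none_iff _ _).mp h) hpre
    | some m => exact ⟨m, rfl⟩
  obtain ⟨t, ht⟩ : ∃ t, PySem.List.max? (A.map (fun h => min (h - mn) (mx - h))) (fun x => x) = some t := by
    cases h : PySem.List.max? (A.map (fun h => min (h - mn) (mx - h))) (fun x => x) with
    | none =>
      have := (PySem.List.max?_eq_none_iff _ _).mp h
      simp at this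
      exact absurd this hpre
    | some m => exact ⟨m, rfl⟩
  simp only [hmx, hmn, Option.bind_some, ht, Option.map_some, Option.getD_some]
  have hmxmem : mx ∈ A := PySem.List.max?_mem hmx
  have hmnmem : mn ∈ A := PySem.List.min?_mem hmn
  have hmxmax : ∀ y ∈ A, y ≤ mx := fun y hy => PySem.List.max?_isMax hmx y hy
  have hmnmin : ∀ y ∈ A, mn ≤ y := fun y hy => PySem.List.min?_isMin hmn y hy
  have htmem : t ∈ A.map (fun h => min (h - mn) (mx - h)) := PySem.List.max?_mem ht
  have htmax : ∀ y ∈ A.map (fun h => min (h - mn) (mx - h)), y ≤ t :=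
    fun y hy => PySem.List.max?_isMax ht y hy
  -- bounds on t
  obtain ⟨h0, hh0mem, hh0⟩ : ∃ h0, h0 ∈ A ∧ t = min (h0 - mn) (mx - h0) := by
    simpa [eq_comm] using htmem
  have ht_nonneg : 0 ≤ t := by
    have h1 := hmnmin h0 hh0mem
    have h2 := hmxmax h0 hh0mem
    omega
  have ht_le : t ≤ mx - mn := by
    have h1 := hmnmin h0 hh0mem
    have h2 := hmxmax h0 hh0mem
    omega
  -- the inner per-hole check holds iff t ≤ L, for any L ≥ 1
  have hcan : ∀ L : Int, 1 ≤ L →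
      (A.all (fun hole_pos =>
        decide ((mn ≤ hole_pos ∧ hole_pos ≤ mn + L) ∨
                (mx - L ≤ hole_pos ∧ hole_pos ≤ mx))) = true ↔ t ≤ L) := by
    intro L _
    simp only [List.all_eq_true, decide_eq_true_eq]
    constructor
    · intro hall
      have := hall h0 hh0mem
      have h1 := hmnmin h0 hh0mem
      have h2 := hmxmax h0 hh0mem
      omega
    · intro hle h hh
      have hth : min (h - mn) (mx - h) ≤ t := htmax _ (by exact List.mem_map_of_mem hh)
      have h1 := hmnmin h hh
      have h2 := hmxmax h hh
      omega
  -- rewrite A's fold as a min over the filtered range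
  rw [pv_foldl_min_if]
  by_cases hdeg : mx = mn
  · -- single-position case: range empty, answer 1
    subst hdeg
    rw [show PySem.List.pyRange 1 (mx - mx + 1) 1 = [] from
      PySem.List.pyRange_one_eq_nil (by omega)]
    have : t = 0 := by omega
    simp [this]
  · have hlt : mn < mx := by
      have := hmnmin mx hmxmem
      omega
    -- the first (hence least) element of the filtered range is max t 1
    have hfilter_mem : max t 1 ∈ (PySem.List.pyRange 1 (mx - mn + 1) 1).filter
        (fun L => A.all (fun hole_pos =>
          decide ((mn ≤ hole_pos ∧ hole_pos ≤ mn + L) ∨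
                  (mx - L ≤ hole_pos ∧ hole_pos ≤ mx)))) := by
      rw [List.mem_filter]
      constructor
      · rw [PySem.List.mem_pyRange_one]; omega
      · exact (hcan (max t 1) (by omega)).mpr (by omega)
    have hfilter_ge : ∀ x ∈ (PySem.List.pyRange 1 (mx - mn + 1) 1).filter
        (fun L => A.all (fun hole_pos =>
          decide ((mn ≤ hole_pos ∧ hole_pos ≤ mn + L) ∨
                  (mx - L ≤ hole_pos ∧ hole_pos ≤ mx)))), max t 1 ≤ x := by
      intro x hx
      rw [List.mem_filter] at hx
      have hr := (PySem.List.mem_pyRange_one).mp hx.1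
      have := (hcan x (by omega)).mp hx.2
      omega
    rw [pv_foldl_min_mem _ _ _ hfilter_mem hfilter_ge]
    omega
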